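-- pv_equiv track=rewrite | github.com/LilyHeAsamiko/QC | A complete characterization of/categorical tensor network states.py | fWB
-- ===== SOURCE A (Python) =====
-- def fWB(a,b,c):
--     for n in range(len(a)):
--         if [a[n],b[n],c[n]] == [0, 0, 0]:
--             fWB = 0
--         elif [a[n],b[n],c[n]] == [0, 0, 1]:
--             fWB = 1
--         elif [a[n],b[n],c[n]] == [0, 1, 0]:
--             fWB = 1
--         elif [a[n],b[n],c[n]] == [0, 1, 1]:
--             fWB = 0
--         elif [a[n],b[n],c[n]] == [1, 1, 0]:
--             fWB = 0
--         elif [a[n],b[n],c[n]] == [1, 1, 1]: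
--             fWB = 0
--         elif [a[n],b[n],c[n]] == [1, 0, 0]:
--             fWB = 1
--         elif [a[n],b[n],c[n]] == [1, 0, 1]:
--             fWB = 0
--     return fWB
-- ===== SOURCE B (Python) =====
-- GATE = {(0, 0, 0): 0, (0, 0, 1): 1, (0, 1, 0): 1, (0, 1, 1): 0,
--         (1, 0, 0): 1, (1, 0, 1): 0, (1, 1, 0): 0, (1, 1, 1): 0}
--
-- def fWB(a, b, c):
--     # gate value of the last triple that appears in the truth table
--     for t in reversed(list(zip(a, b, c))):
--         if t in GATE:
--             return GATE[t]
-- ===== Notes on version B (the rewrite author's own statement) =====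
-- stated objective: alternative
-- what changed: Replaces the forward index loop over an 8-way if-elif chain that overwrites its result at every matching index by a backward scan of the zipped triples against a truth-table dict, returning at the first hit (the last matching triple).
import Mathlib
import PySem

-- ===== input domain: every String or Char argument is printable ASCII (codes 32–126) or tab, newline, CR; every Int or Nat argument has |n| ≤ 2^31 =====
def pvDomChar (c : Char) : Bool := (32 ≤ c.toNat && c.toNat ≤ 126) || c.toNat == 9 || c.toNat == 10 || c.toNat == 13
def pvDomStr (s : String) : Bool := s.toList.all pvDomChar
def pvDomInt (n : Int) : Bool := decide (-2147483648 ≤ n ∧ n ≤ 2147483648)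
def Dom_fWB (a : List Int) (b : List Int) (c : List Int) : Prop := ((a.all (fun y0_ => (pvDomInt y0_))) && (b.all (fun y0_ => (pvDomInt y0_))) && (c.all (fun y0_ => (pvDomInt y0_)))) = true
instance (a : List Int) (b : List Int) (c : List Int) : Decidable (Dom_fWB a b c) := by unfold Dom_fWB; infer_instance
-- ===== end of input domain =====

-- B replaces A's forward index loop over an 8-way if-elif chain (whose result is
-- overwritten at each matching index) by a backward scan of the zipped triples with
-- a truth-table dict and an early return at the first hit.

-- ===== PORT A =====
-- loop body: state is the (possibly still unbound) local fWB, Option Int;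
-- Pre_ keeps every read index in range, so the pyGetD defaults are never read.
def fWBstepA (a : List Int) (b : List Int) (c : List Int) (s : Option Int) (n : Int) : Option Int :=
  let t : Int × Int × Int := (PySem.List.pyGetD a n 0, PySem.List.pyGetD b n 0, PySem.List.pyGetD c n 0)
  if t = (0, 0, 0) then some 0
  else if t = (0, 0, 1) then some 1
  else if t = (0, 1, 0) then some 1
  else if t = (0, 1, 1) then some 0
  else if t = (1, 1, 0) then some 0
  else if t = (1, 1, 1) then some 0
  else if t = (1, 0, 0) then some 1
  else if t = (1, 0, 1) then some 0
  else s

-- `return fWB` raises UnboundLocalError when the state is still none; Pre_ excludes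
-- those inputs, so the `.getD 0` default is never the value claimed about.
def fWB (a : List Int) (b : List Int) (c : List Int) : Int :=
  ((PySem.List.pyRange 0 (PySem.List.len a) 1).foldl (fWBstepA a b c) none).getD 0

-- ===== PORT B =====
-- GATE = {(0,0,0): 0, …}: the module-level truth table
def GATEpv : PySem.Dict (Int × Int × Int) Int :=
  PySem.Dict.ofList [((0,0,0),0), ((0,0,1),1), ((0,1,0),1), ((0,1,1),0),
                     ((1,0,0),1), ((1,0,1),0), ((1,1,0),0), ((1,1,1),0)]

-- for t in reversed(list(zip(a, b, c))): if t in GATE: return GATE[t]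
-- (falling off the loop is Python's implicit `return None` — only outside Pre_)
def fWBscanB (ts : List (Int × Int × Int)) : Option Int :=
  match ts with
  | [] => none
  | t :: rest => if GATEpv.contains t then GATEpv.get? t else fWBscanB rest

def fWB_alt (a : List Int) (b : List Int) (c : List Int) : Int :=
  (fWBscanB ((a.zip (b.zip c)).reverse)).getD 0

-- ===== PRECONDITION & SPEC =====
-- Pre_ is exactly where the Python A returns: b and c at least as long as a (else
-- IndexError) and some index holding an all-0/1 triple (else UnboundLocalError).
def Pre_fWB (a : List Int) (b : List Int) (c : List Int) : Prop :=
  a.length ≤ b.length ∧ a.length ≤ c.length ∧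
  ∃ n ∈ List.range a.length,
    (a.getD n 0 = 0 ∨ a.getD n 0 = 1) ∧ (b.getD n 0 = 0 ∨ b.getD n 0 = 1) ∧
    (c.getD n 0 = 0 ∨ c.getD n 0 = 1)
instance (a : List Int) (b : List Int) (c : List Int) : Decidable (Pre_fWB a b c) := by
  unfold Pre_fWB; infer_instance

def pvWitness_fWB : List Int × List Int × List Int := ([0, 1], [0, 0], [0, 2])

def Spec_fWB (a : List Int) (b : List Int) (c : List Int) (out : Int) : Prop := out = fWB_alt a b c
instance (a : List Int) (b : List Int) (c : List Int) (out : Int) : Decidable (Spec_fWB a b c out) := by unfold Spec_fWB; infer_instance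

-- ===== CLAIM (what is proved, stated in full; the proofs are below) =====
def Claim_equal_fWB : Prop := ∀ (a : List Int) (b : List Int) (c : List Int), Dom_fWB a b c → Pre_fWB a b c → Spec_fWB a b c (fWB a b c)

-- ===== LEMMAS AND PROOFS =====

-- the truth-table dict, read entry by entry
set_option maxHeartbeats 2000000 in
lemma gate_get (t : Int × Int × Int) : GATEpv.get? t =
    (if t = (0,0,0) then some 0 else if t = (0,0,1) then some 1 else if t = (0,1,0) then some 1
     else if t = (0,1,1) then some 0 else if t = (1,1,0) then some 0 else if t = (1,1,1) then some 0
     else if t = (1,0,0) then some 1 else if t = (1,0,1) then some 0 else none) := by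
  have h : GATEpv = PySem.Dict.mk [((0,0,0),0), ((0,0,1),1), ((0,1,0),1), ((0,1,1),0),
                     ((1,0,0),1), ((1,0,1),0), ((1,1,0),0), ((1,1,1),0)] := by rfl
  rw [h]
  simp only [PySem.Dict.get?_mk_cons]
  split_ifs with h1 h2 h3 h4 h5 h6 h7 h8 <;> simp_all [PySem.Dict.get?]

-- A's loop body is a table lookup that keeps the state on a miss
lemma stepA_or (a b c : List Int) (s : Option Int) (n : Int) :
    fWBstepA a b c s n =
      (GATEpv.get? (PySem.List.pyGetD a n 0, PySem.List.pyGetD b n 0, PySem.List.pyGetD c n 0)).or s := by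
  simp only [fWBstepA, gate_get, apply_ite (fun o : Option Int => o.or s),
    Option.some_or, Option.none_or]

-- B's early-returning loop, one step at a time
lemma scanB_cons (t : Int × Int × Int) (r : List (Int × Int × Int)) :
    fWBscanB (t :: r) = (GATEpv.get? t).or (fWBscanB r) := by
  rw [fWBscanB, PySem.Dict.contains_eq_isSome_get?]
  cases hg : GATEpv.get? t <;> simp_all

-- index-list version of the table scan (proof vehicle between the two loops)
def fWBidx (a b c : List Int) : List Int → Option Int
  | [] => none
  | n :: r =>
    (GATEpv.get? (PySem.List.pyGetD a n 0, PySem.List.pyGetD b n 0, PySem.List.pyGetD c n 0)).or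
      (fWBidx a b c r)

lemma fWBidx_append (a b c : List Int) (xs ys : List Int) :
    fWBidx a b c (xs ++ ys) = (fWBidx a b c xs).or (fWBidx a b c ys) := by
  induction xs with
  | nil => simp [fWBidx]
  | cons n r ih => simp [fWBidx, ih, Option.or_assoc]

lemma foldlA_eq_idx (a b c : List Int) (L : List Int) (s : Option Int) :
    L.foldl (fWBstepA a b c) s = (fWBidx a b c L.reverse).or s := by
  induction L generalizing s with
  | nil => simp [fWBidx]
  | cons n rest ih =>
    rw [List.foldl_cons, ih, stepA_or, List.reverse_cons, fWBidx_append, Option.or_assoc]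
    simp [fWBidx]

-- the forward index scan over 0..k-1 is B's scan over the first k zipped triples
lemma idx_eq_scanB (a b c : List Int) (k : Nat) (hk : k ≤ a.length)
    (hb : a.length ≤ b.length) (hc : a.length ≤ c.length) :
    fWBidx a b c (((List.range k).map (fun i : Nat => (i : Int))).reverse)
      = fWBscanB (((a.zip (b.zip c)).take k).reverse) := by
  induction k with
  | zero => simp [fWBidx, fWBscanB]
  | succ k ih =>
    have hka : k < a.length := by omega
    have hkb : k < b.length := by omega
    have hkc : k < c.length := by omega
    have hkz : k < (a.zip (b.zip c)).length := by
      simp only [List.length_zip]; omega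
    have hL : ((List.range (k+1)).map (fun i : Nat => (i : Int))).reverse
        = (k : Int) :: ((List.range k).map (fun i : Nat => (i : Int))).reverse := by
      rw [List.range_succ]; simp
    have hR : ((a.zip (b.zip c)).take (k+1)).reverse
        = (a.zip (b.zip c))[k]'hkz :: ((a.zip (b.zip c)).take k).reverse := by
      rw [List.take_add_one, List.getElem?_eq_getElem hkz]; simp
    rw [hL, hR, scanB_cons]
    simp only [fWBidx]
    rw [ih (by omega)]
    congr 2
    simp [List.getElem_zip, PySem.List.pyGetD_natCast, hka, hkb, hkc]

-- ===== VERDICT (by name: the statement is the Claim_ definition above) =====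
theorem fWB_spec : Claim_equal_fWB := by
  intro a b c _ hpre
  obtain ⟨hb, hc, -⟩ := hpre
  unfold Spec_fWB fWB fWB_alt
  have hr : PySem.List.pyRange 0 (PySem.List.len a) 1
      = (List.range a.length).map (fun i : Nat => (i : Int)) := by
    rw [show PySem.List.len a = ((a.length : Nat) : Int) from rfl, PySem.List.pyRange_zero_natCast]
  rw [hr, foldlA_eq_idx, Option.or_none, idx_eq_scanB a b c a.length le_rfl hb hc,
    List.take_of_length_le (by simp [List.length_zip])]
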